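-- pv_equiv track=rewrite | github.com/ktllee/plug_problem | convolve.py | t2p
-- ===== SOURCE A (Python) =====
-- def t2p( t ):
--     '''
--     input t is a list of total counts
--     output p is a list of prime counts
--     '''
--     p= []
--     p.append(t[0])
--     for i in range(len(t))[1:]:
--         nextp = t[i]
--         for j in range(i):
--             nextp -= t[j]*p[i-j-1]
--         p.append(nextp)
--     return p
-- ===== SOURCE B (Python) =====
-- def t2p(t):
--     c = list(t)
--     p = []
--     for i in range(len(t)):
--         pi = c[i]
--         p.append(pi)
--         for j in range(len(t) - i - 1):
--             c[i + j + 1] -= t[j] * pi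
--     return p
-- ===== Notes on version B (the rewrite author's own statement) =====
-- stated objective: alternative
-- what changed: Replaces the backward pull (each p[i] re-reads all earlier p-values via an inner scan over j<i) with a forward push over a working copy of t: each produced p-value immediately subtracts its future contributions t[j]*p[i] from c[i+j+1], so p[i] is just read off c[i].
import Mathlib
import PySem

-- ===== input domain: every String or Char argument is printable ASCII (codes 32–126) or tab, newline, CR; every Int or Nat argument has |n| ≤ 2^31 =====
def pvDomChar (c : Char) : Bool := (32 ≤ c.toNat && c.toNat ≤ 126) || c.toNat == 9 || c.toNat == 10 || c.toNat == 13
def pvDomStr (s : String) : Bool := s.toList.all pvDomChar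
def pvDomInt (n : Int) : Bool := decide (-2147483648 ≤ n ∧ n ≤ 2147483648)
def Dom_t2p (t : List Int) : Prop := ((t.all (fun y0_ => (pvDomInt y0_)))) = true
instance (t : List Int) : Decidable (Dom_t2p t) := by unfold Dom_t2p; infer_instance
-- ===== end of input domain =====

-- B replaces A's backward pull (p[i] re-reads all earlier p-values) by a forward push over a
-- working copy of t (each produced p-value immediately subtracts its future contributions); same cost.
-- ===== PORT A =====
-- p = []; p.append(t[0]); for i in range(len(t))[1:]: nextp = t[i]; for j in range(i): nextp -= t[j]*p[i-j-1]; p.append(nextp)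
def t2p (t : List Int) : List Int :=
  let p : List Int := []
  let p := p ++ [PySem.List.pyGetD t 0 0]      -- t[0]: IndexError on [] — excluded by Pre_t2p
  ((PySem.List.pyRange 0 (t.length : Int) 1).drop 1).foldl (fun p i =>   -- range(len(t))[1:]
    let nextp :=
      (PySem.List.pyRange 0 i 1).foldl
        (fun nextp j => nextp - PySem.List.pyGetD t j 0 * PySem.List.pyGetD p (i - j - 1) 0)
        (PySem.List.pyGetD t i 0)
    p ++ [nextp]) p

-- ===== PORT B =====
-- c = list(t); p = []; for i in range(len(t)): pi = c[i]; p.append(pi); for j in range(len(t)-i-1): c[i+j+1] -= t[j]*pi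
def t2p_alt (t : List Int) : List Int :=
  ((PySem.List.pyRange 0 (t.length : Int) 1).foldl (fun (st : List Int × List Int) i =>
    let c := st.1
    let p := st.2
    let pi := PySem.List.pyGetD c i 0
    let p := p ++ [pi]
    let c := (PySem.List.pyRange 0 ((t.length : Int) - i - 1) 1).foldl
      (fun c j =>
        PySem.List.pySetD c (i + j + 1)
          (PySem.List.pyGetD c (i + j + 1) 0 - PySem.List.pyGetD t j 0 * pi)) c
    (c, p)) (t, [])).2

-- ===== PRECONDITION & SPEC =====
-- Pre_ excludes only the empty list, on which A raises IndexError (t[0]).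
def Pre_t2p (t : List Int) : Prop := t ≠ []
instance (t : List Int) : Decidable (Pre_t2p t) := by unfold Pre_t2p; infer_instance
def pvWitness_t2p : List Int := [2, 3, 5]

def Spec_t2p (t : List Int) (out : List Int) : Prop := out = t2p_alt t
instance (t : List Int) (out : List Int) : Decidable (Spec_t2p t out) := by unfold Spec_t2p; infer_instance

-- ===== CLAIM (what is proved, stated in full; the proofs are below) =====
def Claim_equal_t2p : Prop := ∀ (t : List Int), Dom_t2p t → Pre_t2p t → Spec_t2p t (t2p t)

-- ===== LEMMAS AND PROOFS =====

-- The common specification: the "prime counts" recursion p(i) = t[i] - Σ_{j<i} t[j]·p(i-j-1).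
def pvP (t : List Int) (i : Nat) : Int :=
  t.getD i 0 - ((List.range i).attach.map (fun j => t.getD j.1 0 * pvP t (i - j.1 - 1))).sum
termination_by i
decreasing_by
  have := j.2; simp [List.mem_range] at this; omega

theorem pvP_eq (t : List Int) (i : Nat) :
    pvP t i = t.getD i 0 - ((List.range i).map (fun j => t.getD j 0 * pvP t (i - j - 1))).sum := by
  rw [pvP]
  congr 1
  simp

theorem pv_foldl_sub (l : List Nat) (f : Nat → Int) (init : Int) :
    l.foldl (fun a x => a - f x) init = init - (l.map f).sum := by
  induction l generalizing init with
  | nil => simp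
  | cons x xs ih => simp [ih]; ring

theorem pv_sum_range (n : Nat) (f : Nat → Int) :
    ((List.range n).map f).sum = ∑ j ∈ Finset.range n, f j := rfl

-- Σ_{j<k} t[k-j-1]·p(j) = Σ_{j<k} t[j]·p(k-j-1): reflection of the convolution sum.
theorem pv_reflect (t : List Int) (k : Nat) :
    ((List.range k).map (fun j => t.getD (k - j - 1) 0 * pvP t j)).sum
      = ((List.range k).map (fun j => t.getD j 0 * pvP t (k - j - 1))).sum := by
  rw [pv_sum_range, pv_sum_range,
    ← Finset.sum_range_reflect (fun j => t.getD j 0 * pvP t (k - j - 1)) k]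
  apply Finset.sum_congr rfl
  intro j hj
  simp only [Finset.mem_range] at hj
  have h1 : k - j - 1 = k - 1 - j := by omega
  have h2 : k - (k - 1 - j) - 1 = j := by omega
  rw [h1, h2]

theorem pv_map_getD (l : List Int) :
    (List.range l.length).map (fun m => l.getD m 0) = l := by
  apply List.ext_getElem
  · simp
  · intro i h1 h2
    simp only [List.getElem_map, List.getElem_range]
    rw [List.getD_eq_getElem?_getD, List.getElem?_eq_getElem h2]
    rfl

-- two lists are equal when their lengths and all in-range getD-values agree
theorem pv_ext (l1 l2 : List Int) (hl : l1.length = l2.length)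
    (h : ∀ i, i < l1.length → l1.getD i 0 = l2.getD i 0) : l1 = l2 := by
  apply List.ext_getElem hl
  intro i h1 h2
  have := h i h1
  rwa [List.getD_eq_getElem?_getD, List.getD_eq_getElem?_getD,
    List.getElem?_eq_getElem h1, List.getElem?_eq_getElem h2] at this

theorem pv_getD_set (l : List Int) (n i : Nat) (v : Int) (hn : n < l.length) :
    (l.set n v).getD i 0 = if i = n then v else l.getD i 0 := by
  rw [List.getD_eq_getElem?_getD, List.getElem?_set]
  split_ifs with h1 h2 h3
  · rfl
  · omega
  · omega
  · rw [List.getD_eq_getElem?_getD]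

-- ===== the A-side loop =====
theorem t2p_loop (t : List Int) (k : Nat) (hk : 1 ≤ k) :
    (PySem.List.pyRange 1 (k : Int) 1).foldl (fun p i =>
      p ++ [(PySem.List.pyRange 0 i 1).foldl
        (fun nextp j => nextp - PySem.List.pyGetD t j 0 * PySem.List.pyGetD p (i - j - 1) 0)
        (PySem.List.pyGetD t i 0)])
      [t.getD 0 0]
    = (List.range k).map (pvP t) := by
  induction k with
  | zero => omega
  | succ k ih =>
    by_cases hk0 : k = 0
    · subst hk0
      rw [show ((1:Nat) : Int) = 1 by norm_num, PySem.List.pyRange_one_eq_nil (by norm_num)]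
      simp only [List.foldl_nil]
      have h0 : pvP t 0 = t.getD 0 0 := by rw [pvP_eq]; simp
      simp [List.range_succ, h0]
    · have hk1 : 1 ≤ k := by omega
      rw [show (((k+1 : Nat)) : Int) = (k : Int) + 1 by push_cast; ring,
        PySem.List.pyRange_one_succ_right (by exact_mod_cast hk1),
        List.foldl_append, ih hk1]
      simp only [List.foldl_cons, List.foldl_nil]
      rw [List.range_succ, List.map_append, List.map_cons, List.map_nil]
      congr 1
      -- the inner pull-sum at i = k equals pvP t k
      rw [PySem.List.pyRange_zero_nat k, List.foldl_map,
        PySem.List.foldl_congr_mem (List.range k) _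
          (fun a jn => a - t.getD jn 0 * pvP t (k - jn - 1)) _
          (by
            intro acc jn hjn
            simp only [List.mem_range] at hjn
            have hc : (k : Int) - (jn : Int) - 1 = ((k - jn - 1 : Nat) : Int) := by
              push_cast [Nat.sub_sub]; omega
            rw [hc, PySem.List.pyGetD_natCast, PySem.List.pyGetD_natCast,
              PySem.List.getD_map_range (pvP t) k (k - jn - 1) 0 (by omega)]),
        pv_foldl_sub]
      simp only [PySem.List.pyGetD_natCast]
      rw [← pvP_eq]

theorem t2p_eq_map (t : List Int) (h : t ≠ []) :
    t2p t = (List.range t.length).map (pvP t) := by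
  have hlen : 1 ≤ t.length := List.length_pos_of_ne_nil h
  unfold t2p
  rw [PySem.List.pyRange_one_cons (by exact_mod_cast hlen), List.drop_one, List.tail_cons,
    show (0:Int) + 1 = 1 by norm_num, PySem.List.pyGetD_zero]
  exact t2p_loop t t.length hlen

-- ===== the B-side loop =====
-- the working array after k outer iterations: c[m] = t[m] - Σ_{j<min(k,m)} t[m-j-1]·p(j)
def pvC (t : List Int) (k : Nat) : List Int :=
  (List.range t.length).map (fun m =>
    t.getD m 0 - ((List.range (min k m)).map (fun j => t.getD (m - j - 1) 0 * pvP t j)).sum)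

theorem pvC_zero (t : List Int) : pvC t 0 = t := by
  unfold pvC
  simpa using pv_map_getD t

theorem pvC_length (t : List Int) (k : Nat) : (pvC t k).length = t.length := by
  simp [pvC]

theorem pvC_getD (t : List Int) (k m : Nat) (hm : m < t.length) :
    (pvC t k).getD m 0
      = t.getD m 0 - ((List.range (min k m)).map (fun j => t.getD (m - j - 1) 0 * pvP t j)).sum := by
  unfold pvC
  rw [PySem.List.getD_map_range _ t.length m 0 hm]

theorem pvC_getD_self (t : List Int) (k : Nat) (hk : k < t.length) :
    (pvC t k).getD k 0 = pvP t k := by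
  rw [pvC_getD t k k hk, min_self, pv_reflect, ← pvP_eq]

-- partial state of the inner push loop, r updates done
def pvCI (t : List Int) (k r : Nat) : List Int :=
  (List.range t.length).map (fun m =>
    (pvC t k).getD m 0 - (if k + 1 ≤ m ∧ m < k + 1 + r then t.getD (m - k - 1) 0 * pvP t k else 0))

theorem pvCI_zero (t : List Int) (k : Nat) : pvCI t k 0 = pvC t k := by
  unfold pvCI
  have h : ∀ m : Nat, ¬ (k + 1 ≤ m ∧ m < k + 1 + 0) := by omega
  simp only [h, if_false, sub_zero]
  rw [show t.length = (pvC t k).length from (pvC_length t k).symm]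
  exact pv_map_getD (pvC t k)

theorem pvCI_getD (t : List Int) (k r m : Nat) (hm : m < t.length) :
    (pvCI t k r).getD m 0
      = (pvC t k).getD m 0 - (if k + 1 ≤ m ∧ m < k + 1 + r then t.getD (m - k - 1) 0 * pvP t k else 0) := by
  unfold pvCI
  rw [PySem.List.getD_map_range _ t.length m 0 hm]

theorem pvCI_length (t : List Int) (k r : Nat) : (pvCI t k r).length = t.length := by
  simp [pvCI]

theorem inner_loop (t : List Int) (k : Nat) (hk : k < t.length) (r : Nat)
    (hr : r ≤ t.length - k - 1) :
    (List.range r).foldl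
      (fun (c : List Int) (jn : Nat) => PySem.List.pySetD c ((k : Int) + (jn : Int) + 1)
        (PySem.List.pyGetD c ((k : Int) + (jn : Int) + 1) 0 - PySem.List.pyGetD t (jn : Int) 0 * pvP t k))
      (pvC t k)
    = pvCI t k r := by
  induction r with
  | zero => simp [pvCI_zero]
  | succ r ih =>
    rw [List.range_succ, List.foldl_append, ih (by omega)]
    simp only [List.foldl_cons, List.foldl_nil]
    have hidx : (k : Int) + (r : Int) + 1 = ((k + r + 1 : Nat) : Int) := by push_cast; ring
    have hlt : k + r + 1 < t.length := by omega
    have hlen := pvCI_length t k r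
    rw [hidx]
    simp only [PySem.List.pySetD_natCast, PySem.List.pyGetD_natCast]
    rw [pvCI_getD t k r (k + r + 1) hlt,
      if_neg (by omega : ¬ (k + 1 ≤ k + r + 1 ∧ k + r + 1 < k + 1 + r)), sub_zero]
    -- setting index k+r+1 extends the updated window by one
    apply pv_ext
    · rw [List.length_set, pvCI_length, pvCI_length]
    · intro i hi
      rw [List.length_set, pvCI_length] at hi
      rw [pv_getD_set _ _ _ _ (by rw [pvCI_length]; omega),
        pvCI_getD t k (r + 1) i hi, pvCI_getD t k r i hi]
      by_cases he : i = k + r + 1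
      · subst he
        rw [if_pos (by omega : k + 1 ≤ k + r + 1 ∧ k + r + 1 < k + 1 + (r + 1)),
          show k + r + 1 - k - 1 = r by omega]
        simp
      · rw [if_neg he]
        by_cases hc : k + 1 ≤ i ∧ i < k + 1 + r
        · rw [if_pos hc, if_pos (by omega)]
        · rw [if_neg hc, if_neg (by omega)]

theorem pvCI_full (t : List Int) (k : Nat) (hk : k < t.length) :
    pvCI t k (t.length - k - 1) = pvC t (k + 1) := by
  apply pv_ext
  · rw [pvCI_length, pvC_length]
  · intro i hi
    rw [pvCI_length] at hi
    rw [pvCI_getD t k _ i hi, pvC_getD t k i hi, pvC_getD t (k + 1) i hi]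
    by_cases hc : k + 1 ≤ i
    · rw [if_pos (by omega : k + 1 ≤ i ∧ i < k + 1 + (t.length - k - 1)),
        min_eq_left (by omega), min_eq_left (by omega), List.range_succ,
        List.map_append, List.sum_append]
      simp only [List.map_cons, List.map_nil, List.sum_cons, List.sum_nil]
      ring
    · rw [if_neg (by omega), sub_zero, min_eq_right (by omega), min_eq_right (by omega)]

theorem outer_loop (t : List Int) (k : Nat) (hk : k ≤ t.length) :
    (List.range k).foldl
      (fun (st : List Int × List Int) (i : Nat) =>
        ((PySem.List.pyRange 0 ((t.length : Int) - (i : Int) - 1) 1).foldl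
          (fun c j =>
            PySem.List.pySetD c ((i : Int) + j + 1)
              (PySem.List.pyGetD c ((i : Int) + j + 1) 0
                - PySem.List.pyGetD t j 0 * PySem.List.pyGetD st.1 (i : Int) 0)) st.1,
         st.2 ++ [PySem.List.pyGetD st.1 (i : Int) 0]))
      (t, ([] : List Int))
    = (pvC t k, (List.range k).map (pvP t)) := by
  induction k with
  | zero => simp [pvC_zero]
  | succ k ih =>
    rw [List.range_succ, List.foldl_append, ih (by omega)]
    simp only [List.foldl_cons, List.foldl_nil]
    have hk' : k < t.length := by omega
    have hpi : PySem.List.pyGetD (pvC t k) (k : Int) 0 = pvP t k := by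
      rw [PySem.List.pyGetD_natCast]
      exact pvC_getD_self t k hk'
    rw [hpi]
    have hcnt : (t.length : Int) - (k : Int) - 1 = ((t.length - k - 1 : Nat) : Int) := by
      omega
    rw [hcnt, PySem.List.pyRange_zero_nat, List.foldl_map,
      inner_loop t k hk' (t.length - k - 1) (le_refl _), pvCI_full t k hk']
    simp

theorem t2p_alt_eq_map (t : List Int) :
    t2p_alt t = (List.range t.length).map (pvP t) := by
  unfold t2p_alt
  rw [PySem.List.pyRange_zero_nat, List.foldl_map, outer_loop t t.length (le_refl _)]

-- ===== VERDICT (by name: the statement is the Claim_ definition above) =====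
theorem t2p_spec : Claim_equal_t2p := by
  intro t _ hpre
  unfold Spec_t2p
  rw [t2p_eq_map t hpre, t2p_alt_eq_map]
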